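-- pv_equiv track=rewrite | github.com/KavabONga/UrbanHack2018 | SpeedBumpMap/Scripts/classification.py | Weight_Sort
-- ===== SOURCE A (Python) =====
-- def Weight_Sort(a):
--   passenger_car=0
--   busOrLiteTrack=0
--   truck=0
--   for i in range (1,len(a)):
--     if (a[i] <=18):
--       passenger_car += 1
--     elif(a[i] <= 24):
--       busOrLiteTrack += 3
--     else:
--       truck += 1
--   classified_cars = [passenger_car, busOrLiteTrack, truck]
--   return classified_cars
-- ===== SOURCE B (Python) =====
-- def _bisect_right(xs, v):
--     lo, hi = 0, len(xs)
--     while lo < hi: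
--         mid = (lo + hi) // 2
--         if xs[mid] <= v:
--             lo = mid + 1
--         else:
--             hi = mid
--     return lo
--
-- def Weight_Sort(a):
--     rest = sorted(a[1:])
--     i18 = _bisect_right(rest, 18)
--     i24 = _bisect_right(rest, 24)
--     return [i18, 3 * (i24 - i18), len(rest) - i24]
-- ===== Notes on version B (the rewrite author's own statement) =====
-- stated objective: alternative
-- what changed: Sorts a[1:] and reads the three counts off as threshold positions found by a hand-written binary search (bisect_right at 18 and at 24), instead of accumulating counters element by element in one branching loop.
import Mathlib
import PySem

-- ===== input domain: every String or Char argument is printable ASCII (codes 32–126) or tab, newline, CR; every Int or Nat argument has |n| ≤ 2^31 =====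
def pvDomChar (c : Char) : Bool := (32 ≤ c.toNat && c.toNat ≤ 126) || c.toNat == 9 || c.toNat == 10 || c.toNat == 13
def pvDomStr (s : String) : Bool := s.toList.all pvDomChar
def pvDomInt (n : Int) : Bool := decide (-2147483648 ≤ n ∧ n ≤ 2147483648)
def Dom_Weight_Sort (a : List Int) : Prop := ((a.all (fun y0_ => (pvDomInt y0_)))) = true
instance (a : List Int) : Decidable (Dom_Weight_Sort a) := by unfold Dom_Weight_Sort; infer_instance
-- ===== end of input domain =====

-- B sorts a[1:] and reads the three counts off threshold positions found by hand-written binary search ('alternative': different algorithm, not faster).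
-- ===== PORT A =====
-- for i in range(1, len(a)): a[i] — every index is in range, so pyGetD's default 0 is never used (exact).
def Weight_Sort (a : List Int) : List Int :=
  let s : Int × Int × Int :=
    (PySem.List.pyRange 1 (a.length : Int) 1).foldl
      (fun (acc : Int × Int × Int) i =>
        if PySem.List.pyGetD a i 0 ≤ 18 then (acc.1 + 1, acc.2.1, acc.2.2)
        else if PySem.List.pyGetD a i 0 ≤ 24 then (acc.1, acc.2.1 + 3, acc.2.2)
        else (acc.1, acc.2.1, acc.2.2 + 1))
      (0, 0, 0)
  [s.1, s.2.1, s.2.2]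

-- ===== PORT B =====
-- hand-written bisect_right from Source B: the while loop becomes recursion on hi - lo;
-- lo ≤ mid < hi ≤ len(xs) throughout, so xs[mid] is in range and getD's default 0 is never used (exact).
def pvBisectRight (xs : List Int) (v : Int) (lo hi : Nat) : Nat :=
  if h : lo < hi then
    if xs.getD ((lo + hi) / 2) 0 ≤ v then pvBisectRight xs v ((lo + hi) / 2 + 1) hi
    else pvBisectRight xs v lo ((lo + hi) / 2)
  else lo
termination_by hi - lo
decreasing_by all_goals omega

def Weight_Sort_alt (a : List Int) : List Int :=
  let rest := PySem.List.sorted (a.drop 1) (fun x => x) false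
  let i18 := pvBisectRight rest 18 0 rest.length
  let i24 := pvBisectRight rest 24 0 rest.length
  [(i18 : Int), 3 * ((i24 : Int) - (i18 : Int)), (rest.length : Int) - (i24 : Int)]

-- ===== PRECONDITION & SPEC =====
def Spec_Weight_Sort (a : List Int) (out : List Int) : Prop := out = Weight_Sort_alt a
instance (a : List Int) (out : List Int) : Decidable (Spec_Weight_Sort a out) := by unfold Spec_Weight_Sort; infer_instance

-- ===== CLAIM =====
def Claim_equal_Weight_Sort : Prop := ∀ (a : List Int), Dom_Weight_Sort a → Spec_Weight_Sort a (Weight_Sort a)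

-- ===== LEMMAS AND PROOFS =====

-- loop invariant of A's fold: the triple accumulates the three disjoint counts
theorem ws_fold_counts (l : List Int) (p b t : Int) :
    l.foldl
      (fun (acc : Int × Int × Int) x =>
        if x ≤ 18 then (acc.1 + 1, acc.2.1, acc.2.2)
        else if x ≤ 24 then (acc.1, acc.2.1 + 3, acc.2.2)
        else (acc.1, acc.2.1, acc.2.2 + 1))
      (p, b, t)
    = (p + (l.countP (fun x => decide (x ≤ 18)) : Int),
       b + 3 * (l.countP (fun x => decide (18 < x) && decide (x ≤ 24)) : Int),
       t + (l.countP (fun x => decide (24 < x)) : Int)) := by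
  induction l generalizing p b t with
  | nil => simp [List.countP]
  | cons h tl ih =>
    rw [List.foldl_cons]
    split_ifs with h1 h2 <;>
      simp only [ih, List.countP_cons, Prod.mk.injEq] <;>
      push_cast <;>
      split_ifs <;> simp_all <;> omega

-- if every index below r satisfies the predicate and none at or above r does, countP = r
theorem countP_eq_of_threshold (xs : List Int) (p : Int → Bool) (r : Nat)
    (hr : r ≤ xs.length)
    (h1 : ∀ i, (hi : i < xs.length) → i < r → p xs[i] = true)
    (h2 : ∀ i, (hi : i < xs.length) → r ≤ i → p xs[i] = false) :
    xs.countP p = r := by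
  induction xs generalizing r with
  | nil => simp_all
  | cons x tl ih =>
    cases r with
    | zero =>
      rw [List.countP_eq_zero.mpr]
      intro a ha
      rcases List.mem_iff_getElem.mp ha with ⟨i, hi, rfl⟩
      simp [h2 i hi (Nat.zero_le _)]
    | succ r =>
      rw [List.countP_cons]
      have hx : p x = true := h1 0 (by simp) (Nat.succ_pos _)
      have : tl.countP p = r := by
        apply ih r (by simpa using hr)
        · intro i hi hir
          exact h1 (i + 1) (by simpa using hi) (by omega)
        · intro i hi hir
          exact h2 (i + 1) (by simpa using hi) (by omega)
      simp [this, hx]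

-- the hand-written binary search on a nondecreasing list lands on the count of elements ≤ v
theorem pvBisectRight_eq_countP (xs : List Int) (v : Int)
    (hs : xs.Pairwise (fun a b => a ≤ b)) (lo hi : Nat)
    (hhi : hi ≤ xs.length) (hlo : lo ≤ hi)
    (h1 : ∀ i, (h : i < xs.length) → i < lo → xs[i] ≤ v)
    (h2 : ∀ i, (h : i < xs.length) → hi ≤ i → v < xs[i]) :
    pvBisectRight xs v lo hi = xs.countP (fun x => decide (x ≤ v)) := by
  have hmono := List.pairwise_iff_getElem.mp hs
  unfold pvBisectRight
  split_ifs with h hle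
  · -- xs[mid] ≤ v: move lo up
    have hmid : (lo + hi) / 2 < xs.length := by omega
    rw [List.getD_eq_getElem _ _ hmid] at hle
    exact pvBisectRight_eq_countP xs v hs ((lo + hi) / 2 + 1) hi hhi (by omega)
      (fun i hilen hi' => by
        by_cases hc : i < lo
        · exact h1 i hilen hc
        · rcases Nat.lt_or_ge i ((lo + hi) / 2) with hlt | hge
          · exact le_trans (hmono i ((lo + hi) / 2) hilen hmid hlt) hle
          · have : i = (lo + hi) / 2 := by omega
            subst this; exact hle)
      h2
  · -- v < xs[mid]: move hi down
    have hmid : (lo + hi) / 2 < xs.length := by omega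
    rw [List.getD_eq_getElem _ _ hmid] at hle
    rw [not_le] at hle
    exact pvBisectRight_eq_countP xs v hs lo ((lo + hi) / 2) (by omega) (by omega) h1
      (fun i hilen hi' => by
        rcases Nat.lt_or_ge ((lo + hi) / 2) i with hlt | hge
        · exact lt_of_lt_of_le hle (hmono ((lo + hi) / 2) i hmid hilen hlt)
        · have : i = (lo + hi) / 2 := by omega
          subst this; exact hle)
  · -- lo = hi: every index < lo satisfies, every index ≥ lo does not
    have : lo = hi := by omega
    subst this
    exact (countP_eq_of_threshold xs _ lo (by omega)
      (fun i hi' hilo => by simpa using h1 i hi' hilo)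
      (fun i hi' hilo => by simpa using not_le.mpr (h2 i hi' hilo))).symm
termination_by hi - lo
decreasing_by all_goals omega

-- arithmetic relations between the three bucket counts and the two threshold counts
theorem counts_rel (l : List Int) :
    l.countP (fun x => decide (x ≤ 24))
      = l.countP (fun x => decide (x ≤ 18)) + l.countP (fun x => decide (18 < x) && decide (x ≤ 24))
    ∧ l.length = l.countP (fun x => decide (x ≤ 24)) + l.countP (fun x => decide (24 < x)) := by
  induction l with
  | nil => simp
  | cons x tl ih =>
    obtain ⟨ih1, ih2⟩ := ih
    simp only [List.countP_cons, List.length_cons]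
    by_cases h18 : x ≤ 18 <;> by_cases h24 : x ≤ 24 <;>
      simp [h18, h24] <;> split_ifs <;> omega

theorem Weight_Sort_spec : Claim_equal_Weight_Sort := by
  intro a _
  unfold Spec_Weight_Sort Weight_Sort Weight_Sort_alt
  dsimp only
  have h := PySem.List.foldl_pyRange_pyGetD' a (0 : Int)
      (fun (acc : Int × Int × Int) x =>
        if x ≤ 18 then (acc.1 + 1, acc.2.1, acc.2.2)
        else if x ≤ 24 then (acc.1, acc.2.1 + 3, acc.2.2)
        else (acc.1, acc.2.1, acc.2.2 + 1))
      ((0, 0, 0) : Int × Int × Int) (a := 1) (by norm_num)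
  beta_reduce at h
  rw [h, ws_fold_counts]
  -- B side: the sorted list is a permutation of a.drop 1 with equal counts
  set rest := PySem.List.sorted (a.drop 1) (fun x => x) false with hrest
  have hperm : rest.Perm (a.drop 1) := PySem.List.sorted_perm _ _ _
  have hpair : rest.Pairwise (fun x y => x ≤ y) :=
    PySem.List.sorted_pairwise (a.drop 1) (fun x => x)
  have h18 := pvBisectRight_eq_countP rest 18 hpair 0 rest.length le_rfl (Nat.zero_le _)
      (fun i _ hi => by omega) (fun i hi hgi => by omega)
  have h24 := pvBisectRight_eq_countP rest 24 hpair 0 rest.length le_rfl (Nat.zero_le _)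
      (fun i _ hi => by omega) (fun i hi hgi => by omega)
  have hc18 : rest.countP (fun x => decide (x ≤ 18)) = (a.drop 1).countP (fun x => decide (x ≤ 18)) :=
    hperm.countP_eq _
  have hc24 : rest.countP (fun x => decide (x ≤ 24)) = (a.drop 1).countP (fun x => decide (x ≤ 24)) :=
    hperm.countP_eq _
  have hcg : rest.countP (fun x => decide (24 < x)) = (a.drop 1).countP (fun x => decide (24 < x)) :=
    hperm.countP_eq _
  have hlen : rest.length = (a.drop 1).length := hperm.length_eq
  obtain ⟨hrel1, hrel2⟩ := counts_rel (a.drop 1)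
  have hrelr := counts_rel rest
  simp only [h18, h24, hc18, hc24]
  simp only [List.cons.injEq, and_true]
  refine ⟨?_, ?_, ?_⟩
  · push_cast; omega
  · push_cast; omega
  · rw [hlen]; push_cast; omega
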